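-- pv_equiv track=rewrite | github.com/kristijan-korunoski/Game-Playing-Agents-In-Information-Enviroment | CITS3001_Project_22966841_22904833.py | findVoting
-- ===== SOURCE A (Python) =====
-- def findVoting(green):
--     numVoting = 0
--     numNotVoting = 0
--     for n in green:
--         val = n[1]
--         if val < 0:
--             numNotVoting += 1
--         else:
--             numVoting += 1
--     return numVoting, numNotVoting
-- ===== SOURCE B (Python) =====
-- def findVoting(green):
--     # Divide and conquer: split the list in half, count each half, add the pair counts.
--     def go(lo, hi):
--         if hi - lo == 1:
--             return (0, 1) if green[lo][1] < 0 else (1, 0)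
--         mid = (lo + hi) // 2
--         v1, n1 = go(lo, mid)
--         v2, n2 = go(mid, hi)
--         return (v1 + v2, n1 + n2)
--     if not green:
--         return (0, 0)
--     return go(0, len(green))
-- ===== Notes on version B (the rewrite author's own statement) =====
-- stated objective: alternative
-- what changed: B counts by divide and conquer: it splits the list in half, recursively counts (non-negative, negative) pairs in each half and adds them, instead of A's single left-to-right loop with two if/else-incremented counters.
import Mathlib
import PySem

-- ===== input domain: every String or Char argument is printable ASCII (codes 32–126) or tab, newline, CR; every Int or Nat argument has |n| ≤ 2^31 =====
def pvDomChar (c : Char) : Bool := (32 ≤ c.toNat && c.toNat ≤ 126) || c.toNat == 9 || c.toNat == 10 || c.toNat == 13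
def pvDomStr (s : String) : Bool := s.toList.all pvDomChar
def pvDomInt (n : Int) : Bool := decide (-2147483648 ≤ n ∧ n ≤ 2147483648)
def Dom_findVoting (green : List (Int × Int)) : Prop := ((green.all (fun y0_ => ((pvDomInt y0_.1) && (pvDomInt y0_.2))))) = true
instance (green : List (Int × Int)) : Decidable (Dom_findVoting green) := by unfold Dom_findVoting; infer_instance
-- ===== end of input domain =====

-- B replaces A's single two-counter loop by divide and conquer: split in half, count each half recursively, add the pair counts (alternative decomposition, same cost).

-- ===== PORT A =====
-- Port of A: loop over the list with two counters (numVoting, numNotVoting).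
def findVoting (green : List (Int × Int)) : Int × Int :=
  let r := green.foldl (fun (acc : Int × Int) n =>
    if n.2 < 0 then (acc.1, acc.2 + 1) else (acc.1 + 1, acc.2)) (0, 0)
  (r.1, r.2)

-- ===== PORT B =====
-- Port of B's inner go(lo, hi): Python's index range [lo, hi) on green corresponds to
-- the sublist it denotes; the halves green[lo:mid], green[mid:hi] are l.take m / l.drop m.
def findVoting_alt_go (l : List (Int × Int)) : Int × Int :=
  if _h1 : l.length = 1 then
    if (l.headI).2 < 0 then (0, 1) else (1, 0)
  else
    if _h0 : l.length = 0 then (0, 0)  -- unreachable: go is only called on nonempty ranges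
    else
      let m := l.length / 2
      match findVoting_alt_go (l.take m), findVoting_alt_go (l.drop m) with
      | (v1, n1), (v2, n2) => (v1 + v2, n1 + n2)
termination_by l.length
decreasing_by
  · simp only [List.length_take]; omega
  · simp only [List.length_drop]; omega

def findVoting_alt (green : List (Int × Int)) : Int × Int :=
  if green.isEmpty then (0, 0) else findVoting_alt_go green

-- ===== PRECONDITION & SPEC =====
def Spec_findVoting (green : List (Int × Int)) (out : Int × Int) : Prop := out = findVoting_alt green
instance (green : List (Int × Int)) (out : Int × Int) : Decidable (Spec_findVoting green out) := by unfold Spec_findVoting; infer_instance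

-- ===== CLAIM (what is proved, stated in full; the proofs are below) =====
def Claim_equal_findVoting : Prop := ∀ (green : List (Int × Int)), Dom_findVoting green → Spec_findVoting green (findVoting green)

-- ===== LEMMAS AND PROOFS =====

-- ===== VERDICT (by name: the statement is the Claim_ definition above) =====
lemma go_counts (l : List (Int × Int)) :
    findVoting_alt_go l
      = (((l.filter (fun n => !(n.2 < 0))).length : Int),
         ((l.filter (fun n => n.2 < 0)).length : Int)) := by
  fun_induction findVoting_alt_go l with
  | case1 l h1 hneg =>
    match l, h1 with
    | [x], _ => simp_all
  | case2 l h1 hneg =>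
    match l, h1 with
    | [x], _ => simp_all
  | case3 l h1 h0 =>
    match l, h0 with
    | [], _ => simp
  | case4 l h1 h0 m v1 n1 v2 n2 heq1 heq2 hp hq =>
    have hsplit := List.take_append_drop m l
    simp only [hp, hq] at heq1 heq2
    injection heq1 with hv1 hn1
    injection heq2 with hv2 hn2
    subst hv1 hn1 hv2 hn2
    simp only [Prod.mk.injEq]
    constructor <;>
    · conv_rhs => rw [← hsplit, List.filter_append, List.length_append]
      push_cast; ring

lemma findVoting_loop (green : List (Int × Int)) (a b : Int) :
    green.foldl (fun (acc : Int × Int) n =>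
      if n.2 < 0 then (acc.1, acc.2 + 1) else (acc.1 + 1, acc.2)) (a, b)
    = (a + ((green.filter (fun n => !(n.2 < 0))).length : Int),
       b + ((green.filter (fun n => n.2 < 0)).length : Int)) := by
  induction green generalizing a b with
  | nil => simp
  | cons h t ih =>
    simp only [List.foldl_cons, List.filter_cons]
    by_cases hc : h.2 < 0 <;> simp [hc, ih] <;> ring

-- ===== VERDICT (by name: the statement is the Claim_ definition above) =====
theorem findVoting_spec : Claim_equal_findVoting := by
  intro green _
  unfold Spec_findVoting findVoting findVoting_alt
  rcases green with _ | ⟨h, t⟩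
  · rfl
  · rw [findVoting_loop, go_counts]
    simp
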